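-- pv_equiv track=rewrite | github.com/fabrizzio-gz/project-euler | 051-075/P51/P51.py | get_repsxxx
-- ===== SOURCE A (Python) =====
-- def get_repsxxx(possible_primes):
--     """
--     possible_primes: list of int primes in the form *xxx[last_digit]
--     Returns, for each initial *, how many reps are present as a dictionary 2digits(key)-> #reps(value)
--     """
--     possible_primes_str = list(map(str, possible_primes))
--     evals = {}
--     index1 = 0
--     for prime in possible_primes_str:
--         key = prime[index1]
--         if not key in evals:
--             evals[key] = len([prime for prime in possible_primes_str if prime[index1] == key])
--     return evals
-- ===== SOURCE B (Python) =====
-- def get_repsxxx(possible_primes):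
--     """One pass: count first characters directly with a running dict (no per-key rescans)."""
--     evals = {}
--     for prime in possible_primes:
--         key = str(prime)[0]
--         evals[key] = evals.get(key, 0) + 1
--     return evals
-- ===== Notes on version B (the rewrite author's own statement) =====
-- stated objective: faster
-- what changed: Replaces A's per-new-key full rescan of the stringified list with a single pass that increments a running counter dict keyed by the first character.
import Mathlib
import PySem

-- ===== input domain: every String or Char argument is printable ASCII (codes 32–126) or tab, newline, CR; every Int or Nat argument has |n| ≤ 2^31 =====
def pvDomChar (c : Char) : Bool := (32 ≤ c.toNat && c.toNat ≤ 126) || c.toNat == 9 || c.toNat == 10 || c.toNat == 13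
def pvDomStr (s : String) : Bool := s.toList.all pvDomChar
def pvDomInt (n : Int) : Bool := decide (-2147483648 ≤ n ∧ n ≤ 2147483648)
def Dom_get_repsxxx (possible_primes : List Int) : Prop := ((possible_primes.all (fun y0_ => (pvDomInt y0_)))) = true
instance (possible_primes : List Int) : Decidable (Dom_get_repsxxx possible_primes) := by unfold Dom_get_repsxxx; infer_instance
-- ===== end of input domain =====

-- B replaces A's per-new-key rescan of the whole stringified list (quadratic) with a single
-- counting pass over the input (linear); both return the first-character histogram in
-- first-occurrence order.

-- ===== PORT A =====
-- Python's prime[0]: the one-character string at index 0. str(int) is never empty, so the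
-- IndexError branch (pyGet? = none) is unreachable; "" there is dead code.
def pvFirst (s : String) : String :=
  match PySem.Str.pyGet? s 0 with
  | some c => String.ofList [c]
  | none => ""

def get_repsxxx (possible_primes : List Int) : List (String × Int) :=
  let possible_primes_str := possible_primes.map PySem.Int.toStr
  let evals : PySem.Dict String Int :=
    possible_primes_str.foldl
      (fun evals prime =>
        let key := pvFirst prime
        if evals.contains key then evals
        else evals.insert key
          (((possible_primes_str.filter (fun prime2 => pvFirst prime2 == key)).length : Int)))
      PySem.Dict.empty
  evals.items

-- ===== PORT B =====
def get_repsxxx_alt (possible_primes : List Int) : List (String × Int) :=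
  (possible_primes.foldl
    (fun evals prime =>
      let key := pvFirst (PySem.Int.toStr prime)
      evals.insert key (evals.getD key 0 + 1))
    PySem.Dict.empty).items

-- ===== PRECONDITION & SPEC =====
def Spec_get_repsxxx (possible_primes : List Int) (out : List (String × Int)) : Prop := out = get_repsxxx_alt possible_primes
instance (possible_primes : List Int) (out : List (String × Int)) : Decidable (Spec_get_repsxxx possible_primes out) := by unfold Spec_get_repsxxx; infer_instance

-- ===== CLAIM (what is proved, stated in full; the proofs are below) =====
def Claim_equal_get_repsxxx : Prop := ∀ (possible_primes : List Int), Dom_get_repsxxx possible_primes → Spec_get_repsxxx possible_primes (get_repsxxx possible_primes)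

-- ===== LEMMAS AND PROOFS =====

-- the keys A's loop newly inserts, in order, starting from an already-seen key list
def pvNewKeys (seen : List String) : List String → List String
  | [] => []
  | k :: ks => if k ∈ seen then pvNewKeys seen ks else k :: pvNewKeys (seen ++ [k]) ks

lemma pvKeys_insert_of_not_contains (d : PySem.Dict String Int) (k : String) (v : Int)
    (h : d.contains k = false) : (d.insert k v).keys = d.keys ++ [k] := by
  simp only [PySem.Dict.keys, PySem.Dict.items_insert_of_not_contains d v h, List.map_append,
    List.map_cons, List.map_nil]

-- A's loop appends exactly the unseen keys, each valued by the fixed function g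
lemma pvAfold_items (g : String → Int) :
    ∀ (ks : List String) (d : PySem.Dict String Int),
      (ks.foldl (fun d k => if d.contains k then d else d.insert k (g k)) d).items
        = d.items ++ (pvNewKeys d.keys ks).map (fun k => (k, g k))
  | [], d => by simp [pvNewKeys]
  | k :: ks, d => by
    simp only [List.foldl_cons, pvNewKeys]
    rcases hc : d.contains k with hf | ht
    · have hm : ¬ k ∈ d.keys := by
        simpa [PySem.Dict.contains_eq_decide_mem_keys] using hc
      rw [if_neg hm, if_neg (by simp)]
      rw [pvAfold_items g ks (d.insert k (g k))]
      rw [PySem.Dict.items_insert_of_not_contains d (g k) hc,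
        pvKeys_insert_of_not_contains d k (g k) hc]
      simp
    · have hm : k ∈ d.keys := by
        simpa [PySem.Dict.contains_eq_decide_mem_keys] using hc
      rw [if_pos hm, if_pos (by simp)]
      exact pvAfold_items g ks d

-- PySem.Set.update = the seen list plus the newly seen keys in order
lemma pvUpdate_eq_append_newKeys :
    ∀ (ks seen : List String), PySem.Set.update seen ks = seen ++ pvNewKeys seen ks
  | [], seen => by simp [PySem.Set.update, pvNewKeys]
  | k :: ks, seen => by
    simp only [pvNewKeys]
    by_cases hm : k ∈ seen
    · rw [if_pos hm]
      have hadd : PySem.Set.add seen k = seen := by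
        simp [PySem.Set.add, PySem.Set.contains, hm]
      have : PySem.Set.update seen (k :: ks) = PySem.Set.update (PySem.Set.add seen k) ks := by
        simp [PySem.Set.update]
      rw [this, hadd, pvUpdate_eq_append_newKeys ks seen]
    · rw [if_neg hm]
      have hadd : PySem.Set.add seen k = seen ++ [k] := by
        simp [PySem.Set.add, PySem.Set.contains, hm]
      have : PySem.Set.update seen (k :: ks) = PySem.Set.update (PySem.Set.add seen k) ks := by
        simp [PySem.Set.update]
      rw [this, hadd, pvUpdate_eq_append_newKeys ks (seen ++ [k])]
      simp

lemma pvOfList_eq_newKeys (ks : List String) : PySem.Set.ofList ks = pvNewKeys [] ks := by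
  have h1 : PySem.Set.ofList ks = PySem.Set.update [] ks := by
    rw [PySem.Set.ofList_eq_foldl]; rfl
  rw [h1, pvUpdate_eq_append_newKeys ks []]; simp

-- counting a key among the mapped list = the length of A's filtered comprehension
lemma pvCount_map_eq_filter_length (xs : List String) (k : String) :
    ((xs.map pvFirst).count k : Int) = ((xs.filter (fun q => pvFirst q == k)).length : Int) := by
  rw [List.count, List.countP_eq_length_filter, List.filter_map]
  simp [Function.comp_def]

-- ===== VERDICT (by name: the statement is the Claim_ definition above) =====
theorem get_repsxxx_spec : Claim_equal_get_repsxxx := by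
  intro ps _
  show get_repsxxx ps = get_repsxxx_alt ps
  unfold get_repsxxx get_repsxxx_alt
  simp only []
  -- B's fold over the ints is the counter of the first-character keys
  have hB : ps.foldl
      (fun evals prime =>
        evals.insert (pvFirst (PySem.Int.toStr prime))
          (evals.getD (pvFirst (PySem.Int.toStr prime)) 0 + 1))
      PySem.Dict.empty
      = PySem.Dict.counter ((ps.map PySem.Int.toStr).map pvFirst) := by
    rw [← PySem.Dict.foldl_insert_getD_add_one_eq_counter]
    rw [List.map_map, List.foldl_map]
    rfl
  rw [hB, PySem.Dict.items_counter]
  -- A's fold appends the unseen keys with the rescan counts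
  set strs := ps.map PySem.Int.toStr with hstrs
  have hA : strs.foldl
      (fun evals prime =>
        if evals.contains (pvFirst prime) = true then evals
        else evals.insert (pvFirst prime)
          (((strs.filter (fun prime2 => pvFirst prime2 == pvFirst prime)).length : Int)))
      PySem.Dict.empty
      = (strs.map pvFirst).foldl
          (fun d k => if d.contains k = true then d
            else d.insert k (((strs.filter (fun q => pvFirst q == k)).length : Int)))
          PySem.Dict.empty := by
    simp only [hstrs, List.map_map, List.foldl_map]
    rfl
  rw [hA, pvAfold_items (fun k => ((strs.filter (fun q => pvFirst q == k)).length : Int))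
    (strs.map pvFirst) PySem.Dict.empty]
  rw [pvOfList_eq_newKeys]
  have hkeys : (PySem.Dict.empty : PySem.Dict String Int).keys = [] := by
    simp [PySem.Dict.keys, PySem.Dict.empty]
  rw [hkeys]
  have hitems : (PySem.Dict.empty : PySem.Dict String Int).items = [] := by
    simp [PySem.Dict.empty]
  rw [hitems, List.nil_append]
  exact List.map_congr_left (fun k _ => by
    rw [pvCount_map_eq_filter_length strs k])
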